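-- pv_equiv track=rewrite | github.com/abitabir/ScaleyStuffs | uni/SOF1/Practicals/Practical 5 - 22.10.2019/exercise 4.py | word_frequency_counting
-- ===== SOURCE A (Python) =====
-- def word_frequency_counting(text, output):
--     wordcount = []
--     for j in range(len(output)):
--         wordcount.append(0)
--         for i in range(len(text)):
--             if text[i] == output[j]:
--                 wordcount[j] = 1
--     return(wordcount)
-- ===== SOURCE B (Python) =====
-- def word_frequency_counting(text, output):
--     positions = {}
--     for j in range(len(output)):
--         positions.setdefault(output[j], []).append(j)
--     wordcount = [0] * len(output)
--     for t in set(text):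
--         for j in positions.get(t, []):
--             wordcount[j] = 1
--     return wordcount
-- ===== Notes on version B (the rewrite author's own statement) =====
-- stated objective: faster
-- what changed: Inverts the control flow: instead of rescanning text for each output word with nested index loops, B builds an inverted index (word -> list of its positions in output) once, starts from a zero vector, and makes a single pass over text writing 1 at every indexed position of each word it sees.
import Mathlib
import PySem

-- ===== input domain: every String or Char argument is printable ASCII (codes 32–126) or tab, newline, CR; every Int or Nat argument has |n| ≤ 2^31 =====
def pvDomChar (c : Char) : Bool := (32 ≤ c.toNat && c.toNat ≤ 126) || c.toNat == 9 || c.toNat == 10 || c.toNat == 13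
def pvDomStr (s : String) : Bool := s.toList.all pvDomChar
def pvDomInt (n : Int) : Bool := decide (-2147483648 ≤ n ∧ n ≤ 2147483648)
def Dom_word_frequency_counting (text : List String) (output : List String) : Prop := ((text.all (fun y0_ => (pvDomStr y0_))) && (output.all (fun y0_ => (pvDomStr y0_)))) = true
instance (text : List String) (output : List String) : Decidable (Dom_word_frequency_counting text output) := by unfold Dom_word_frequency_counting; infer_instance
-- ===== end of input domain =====

-- B inverts the control flow: it builds an inverted index word -> positions in output
-- once, then a single pass over text writes 1 at those positions of a zero vector,
-- instead of A's nested loops rescanning text for each output word (objective: faster).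

-- ===== PORT A =====
-- wordcount = []; for j in range(len(output)): append 0; for i in range(len(text)):
--   if text[i] == output[j]: wordcount[j] = 1
def word_frequency_counting (text : List String) (output : List String) : List Int :=
  (List.range output.length).foldl
    (fun wordcount j =>
      let wc := wordcount ++ [(0 : Int)]
      (List.range text.length).foldl
        (fun wc i => if text.getD i "" = output.getD j "" then wc.set j 1 else wc) wc)
    []

-- ===== PORT B =====
-- positions = {}; for j in range(len(output)): positions.setdefault(output[j], []).append(j)
-- wordcount = [0]*len(output)
-- for t in set(text): for j in positions.get(t, []): wordcount[j] = 1
def word_frequency_counting_alt (text : List String) (output : List String) : List Int :=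
  let positions : PySem.Dict String (List Nat) :=
    (List.range output.length).foldl
      (fun d j => d.modify (output.getD j "") [] (fun l => l ++ [j])) PySem.Dict.empty
  let wordcount := List.replicate output.length (0 : Int)
  (PySem.Set.ofList text).foldl
    (fun wc t => (positions.getD t []).foldl (fun wc j => wc.set j 1) wc)
    wordcount

-- ===== PRECONDITION & SPEC =====
def Spec_word_frequency_counting (text : List String) (output : List String) (out : List Int) : Prop := out = word_frequency_counting_alt text output
instance (text : List String) (output : List String) (out : List Int) : Decidable (Spec_word_frequency_counting text output out) := by unfold Spec_word_frequency_counting; infer_instance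

-- ===== CLAIM (what is proved, stated in full; the proofs are below) =====
def Claim_equal_word_frequency_counting : Prop := ∀ (text : List String) (output : List String), Dom_word_frequency_counting text output → Spec_word_frequency_counting text output (word_frequency_counting text output)

-- ===== LEMMAS AND PROOFS =====

-- A's inner loop is 'set j 1' iff some index of text matches.
theorem pv_inner_fold (l : List Nat) (text : List String) (s : String) (j : Nat)
    (acc : List Int) :
    l.foldl (fun wc i => if text.getD i "" = s then wc.set j 1 else wc) acc
      = if (∃ i ∈ l, text.getD i "" = s) then acc.set j 1 else acc := by
  induction l generalizing acc with
  | nil => simp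
  | cons a l ih =>
    rw [List.foldl_cons, ih]
    by_cases h : text.getD a "" = s
    · by_cases h2 : (∃ i ∈ l, text.getD i "" = s)
      · rw [if_pos h2, if_pos h, List.set_set, if_pos ⟨a, List.mem_cons_self, h⟩]
      · rw [if_neg h2, if_pos h, if_pos ⟨a, List.mem_cons_self, h⟩]
    · by_cases h2 : (∃ i ∈ l, text.getD i "" = s)
      · obtain ⟨i, hi, hs⟩ := h2
        rw [if_pos ⟨i, hi, hs⟩, if_neg h, if_pos ⟨i, List.mem_cons_of_mem _ hi, hs⟩]
      · rw [if_neg h2, if_neg h, if_neg ?_]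
        rintro ⟨i, hi, hs⟩
        rcases List.mem_cons.mp hi with rfl | hi'
        · exact h hs
        · exact h2 ⟨i, hi', hs⟩

theorem pv_exists_range (text : List String) (s : String) :
    (∃ i ∈ List.range text.length, text.getD i "" = s) ↔ s ∈ text := by
  constructor
  · rintro ⟨i, hi, hs⟩
    rw [List.mem_range] at hi
    rw [List.getD_eq_getElem _ _ hi] at hs
    exact hs ▸ List.getElem_mem hi
  · intro hs
    obtain ⟨i, hi, hget⟩ := List.mem_iff_getElem.mp hs
    exact ⟨i, List.mem_range.mpr hi, by rw [List.getD_eq_getElem _ _ hi]; exact hget⟩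

theorem pv_set_last (wc : List Int) :
    (wc ++ [(0 : Int)]).set wc.length 1 = wc ++ [(1 : Int)] := by
  induction wc with
  | nil => rfl
  | cons a l ih => simp [ih]

theorem pv_set_last' (wc : List Int) (n : Nat) (h : wc.length = n) :
    (wc ++ [(0 : Int)]).set n 1 = wc ++ [(1 : Int)] := h ▸ pv_set_last wc

def pvFlag (text : List String) (s : String) : Int := if s ∈ text then 1 else 0

theorem pv_outer (text output : List String) (n : Nat) (hn : n ≤ output.length) :
    (List.range n).foldl
      (fun wordcount j =>
        let wc := wordcount ++ [(0 : Int)]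
        (List.range text.length).foldl
          (fun wc i => if text.getD i "" = output.getD j "" then wc.set j 1 else wc) wc)
      []
    = (output.take n).map (fun w => pvFlag text w) := by
  induction n with
  | zero => simp
  | succ n ih =>
    have hn' : n < output.length := hn
    rw [List.range_succ, List.foldl_append, ih (le_of_lt hn')]
    simp only [List.foldl_cons, List.foldl_nil]
    rw [pv_inner_fold]
    have hlen : ((output.take n).map (fun w => pvFlag text w)).length = n := by
      simp [List.length_take, le_of_lt hn']
    have hget : output.getD n "" = output[n] := List.getD_eq_getElem _ _ hn'
    have htake : output.take (n + 1) = output.take n ++ [output[n]] :=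
      List.take_succ_eq_append_getElem hn'
    by_cases hmem : output[n] ∈ text
    · rw [if_pos (by rw [hget]; exact (pv_exists_range text _).mpr hmem)]
      rw [pv_set_last' _ _ hlen, htake, List.map_append]
      simp [pvFlag, hmem]
    · rw [if_neg (by rw [hget]; exact fun h => hmem ((pv_exists_range text _).mp h))]
      rw [htake, List.map_append]
      simp [pvFlag, hmem]

theorem pv_A_eq (text output : List String) :
    word_frequency_counting text output = output.map (fun w => pvFlag text w) := by
  unfold word_frequency_counting
  have := pv_outer text output output.length (le_refl _)
  simpa using this

-- B side --------------------------------------------------------------------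

-- The inverted index: the positions list for key t is exactly the matching indices.
theorem pv_pos_getD (output : List String) (l : List Nat)
    (d : PySem.Dict String (List Nat)) (t : String) :
    (l.foldl (fun d j => d.modify (output.getD j "") [] (fun l => l ++ [j])) d).getD t []
      = d.getD t [] ++ l.filter (fun j => output.getD j "" = t) := by
  induction l generalizing d with
  | nil => simp
  | cons a l ih =>
    rw [List.foldl_cons, ih, PySem.Dict.getD_modify]
    by_cases h : t = output.getD a ""
    · subst h
      rw [if_pos rfl, List.filter_cons, if_pos (by simp)]
      simp
    · rw [if_neg h, List.filter_cons,
        if_neg (by simp; exact fun he => h he.symm)]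

theorem pv_mem_pos (output : List String) (t : String) (k : Nat) :
    (k ∈ ((List.range output.length).foldl
        (fun d j => d.modify (output.getD j "") [] (fun l => l ++ [j]))
        PySem.Dict.empty).getD t [])
      ↔ (k < output.length ∧ output.getD k "" = t) := by
  rw [pv_pos_getD]
  simp [List.mem_filter, List.mem_range]

theorem pv_setfold_length (js : List Nat) (wc : List Int) :
    (js.foldl (fun wc j => wc.set j 1) wc).length = wc.length := by
  induction js generalizing wc with
  | nil => rfl
  | cons a js ih => rw [List.foldl_cons, ih, List.length_set]

theorem pv_setfold_getElem? (js : List Nat) (wc : List Int) (k : Nat) :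
    (js.foldl (fun wc j => wc.set j 1) wc)[k]?
      = if k ∈ js then (if k < wc.length then some 1 else none) else wc[k]? := by
  induction js generalizing wc with
  | nil => simp
  | cons a js ih =>
    rw [List.foldl_cons, ih, List.length_set]
    by_cases hk : k ∈ js
    · simp [hk, List.mem_cons]
    · by_cases ha : k = a
      · subst ha
        simp [hk, List.getElem?_set]
      · simp [hk, ha, Ne.symm ha]

theorem pv_textfold_getElem? (text : List String) (P : String → List Nat)
    (wc : List Int) (k : Nat) :
    (text.foldl (fun wc t => (P t).foldl (fun wc j => wc.set j 1) wc) wc)[k]?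
      = if (∃ t ∈ text, k ∈ P t) then (if k < wc.length then some 1 else none)
        else wc[k]? := by
  induction text generalizing wc with
  | nil => simp
  | cons a text ih =>
    rw [List.foldl_cons, ih, pv_setfold_length, pv_setfold_getElem?]
    by_cases hex : (∃ t ∈ text, k ∈ P t) <;> by_cases ha : k ∈ P a <;>
      simp [hex, ha]

theorem pv_B_eq (text output : List String) :
    word_frequency_counting_alt text output = output.map (fun w => pvFlag text w) := by
  unfold word_frequency_counting_alt
  apply List.ext_getElem?
  intro k
  rw [pv_textfold_getElem?]
  simp only [List.length_replicate]
  by_cases hk : k < output.length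
  · have hmem := fun t => pv_mem_pos output t k
    by_cases hin : output[k] ∈ text
    · rw [if_pos ⟨output[k], (PySem.Set.mem_ofList _ _).mpr hin,
        (hmem _).mpr ⟨hk, List.getD_eq_getElem _ _ hk⟩⟩,
        if_pos hk, List.getElem?_map, List.getElem?_eq_getElem hk]
      simp [pvFlag, hin]
    · rw [if_neg ?_, List.getElem?_replicate, if_pos hk, List.getElem?_map,
        List.getElem?_eq_getElem hk]
      · simp [pvFlag, hin]
      · rintro ⟨t, ht, hkt⟩
        obtain ⟨-, hout⟩ := (hmem t).mp hkt
        rw [List.getD_eq_getElem _ _ hk] at hout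
        exact hin (hout ▸ (PySem.Set.mem_ofList _ _).mp ht)
  · rw [if_neg ?_, List.getElem?_replicate, if_neg hk, List.getElem?_eq_none]
    · simpa using Nat.le_of_not_lt hk
    · rintro ⟨t, ht, hkt⟩
      exact hk ((pv_mem_pos output t k).mp hkt).1

-- ===== VERDICT (by name: the statement is the Claim_ definition above) =====
theorem word_frequency_counting_spec : Claim_equal_word_frequency_counting := by
  intro text output _
  unfold Spec_word_frequency_counting
  rw [pv_A_eq, pv_B_eq]
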